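-- pv_equiv track=rewrite | github.com/RiccardoLeonori/ITS-academy | recupero/listeTupleDizionari.py | convert
-- ===== SOURCE A (Python) =====
-- def convert(tuple):
--     result = {}
--     for key, value in tuple:
--         if key in result:
--             result[key] += value
--         else:
--             result[key] = value
--     return result
-- ===== SOURCE B (Python) =====
-- def _reduce_add(vs):
--     acc = vs[0]
--     for v in vs[1:]:
--         acc = acc + v
--     return acc
--
-- def convert(tuple):
--     groups = {}
--     for key, value in tuple:
--         groups.setdefault(key, []).append(value)
--     return {k: _reduce_add(vs) for k, vs in groups.items()}
-- ===== Notes on version B (the rewrite author's own statement) =====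
-- stated objective: alternative
-- what changed: Replaces inline accumulation with a two-pass group-then-reduce: first bucket every value into a per-key list (setdefault), then build the result by left-folding '+' over each bucket.
import Mathlib
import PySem

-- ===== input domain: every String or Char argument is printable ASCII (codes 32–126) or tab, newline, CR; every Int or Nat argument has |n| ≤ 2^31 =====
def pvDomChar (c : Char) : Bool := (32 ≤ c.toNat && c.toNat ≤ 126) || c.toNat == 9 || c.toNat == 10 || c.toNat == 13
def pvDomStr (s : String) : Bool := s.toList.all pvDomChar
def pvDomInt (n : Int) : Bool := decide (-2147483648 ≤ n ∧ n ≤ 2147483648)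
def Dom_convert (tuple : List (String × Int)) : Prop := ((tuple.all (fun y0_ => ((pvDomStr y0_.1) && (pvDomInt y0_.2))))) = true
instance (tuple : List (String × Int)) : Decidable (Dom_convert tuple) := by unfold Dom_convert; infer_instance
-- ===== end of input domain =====

-- B is an alternative decomposition: group values into per-key lists first, then reduce each bucket with '+'; same O(n) cost, same result.

-- ===== PORT A =====
-- A: single pass, accumulating result[key] += value inline.
def convert (tuple : List (String × Int)) : List (String × Int) :=
  (tuple.foldl (fun d p =>
      if d.contains p.1 then d.modify p.1 0 (fun old => old + p.2)
      else d.insert p.1 p.2)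
    PySem.Dict.empty).items

-- ===== PORT B =====
-- B helper: reduce a bucket left-to-right with '+' starting from its first element
-- (buckets are nonempty in B; Python's _reduce_add would raise on [], the 0 case is unreachable).
def reduceAdd (vs : List Int) : Int :=
  match vs with
  | [] => 0
  | h :: t => t.foldl (fun acc v => acc + v) h

-- B: first pass groups values per key (setdefault(key, []).append(value)), second pass reduces each bucket.
def convert_alt (tuple : List (String × Int)) : List (String × Int) :=
  ((tuple.foldl (fun d p => d.modify p.1 [] (fun vs => vs ++ [p.2]))
      (PySem.Dict.empty : PySem.Dict String (List Int))).items).map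
    (fun kv => (kv.1, reduceAdd kv.2))

-- ===== PRECONDITION & SPEC =====
def Spec_convert (tuple : List (String × Int)) (out : List (String × Int)) : Prop := out = convert_alt tuple
instance (tuple : List (String × Int)) (out : List (String × Int)) : Decidable (Spec_convert tuple out) := by unfold Spec_convert; infer_instance

-- ===== CLAIM (what is proved, stated in full; the proofs are below) =====
def Claim_equal_convert : Prop := ∀ (tuple : List (String × Int)), Dom_convert tuple → Spec_convert tuple (convert tuple)

-- ===== LEMMAS AND PROOFS =====

-- A's branching step is exactly an unconditional modify-with-default-0.
theorem stepA_eq_modify (d : PySem.Dict String Int) (p : String × Int) :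
    (if d.contains p.1 then d.modify p.1 0 (fun old => old + p.2) else d.insert p.1 p.2)
      = d.modify p.1 0 (fun old => old + p.2) := by
  by_cases h : d.contains p.1 = true
  · simp [h]
  · simp only [Bool.not_eq_true] at h
    simp [h, PySem.Dict.modify, PySem.Dict.insert,
      PySem.Dict.getD_of_not_contains d 0 h]

-- getD of A's accumulation fold is the sum of the matching values.
theorem getD_foldA (l : List (String × Int)) (d : PySem.Dict String Int) (k : String) :
    (l.foldl (fun d p => d.modify p.1 0 (fun old => old + p.2)) d).getD k 0
      = d.getD k 0 + ((l.filter (fun p => p.1 == k)).map (·.2)).sum := by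
  induction l generalizing d with
  | nil => simp
  | cons p t ih =>
    simp only [List.foldl_cons, ih, List.filter_cons]
    by_cases h : p.1 = k
    · subst h
      simp [PySem.Dict.getD_modify_self, add_assoc]
    · have hb : (p.1 == k) = false := by simp [h]
      simp [hb, PySem.Dict.getD_modify_of_ne d 0 (fun old => old + p.2) (Ne.symm h)]

theorem reduceAdd_eq_sum (vs : List Int) : reduceAdd vs = vs.sum := by
  cases vs with
  | nil => rfl
  | cons h t =>
    simp only [reduceAdd, List.sum_cons]
    induction t generalizing h with
    | nil => simp
    | cons x t ih => simp [ih, add_assoc]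

theorem convert_eq_alt (tuple : List (String × Int)) :
    convert tuple = convert_alt tuple := by
  unfold convert convert_alt
  have hA : List.foldl (fun d p =>
        if d.contains p.1 then d.modify p.1 0 (fun old => old + p.2)
        else d.insert p.1 p.2) PySem.Dict.empty tuple
      = List.foldl (fun d p => d.modify p.1 0 (fun old => old + p.2)) PySem.Dict.empty tuple :=
    PySem.List.foldl_congr_mem _ _ _ _ (fun acc x _ => stepA_eq_modify acc x)
  rw [hA]
  have hkA := PySem.Dict.keys_foldl_modify_key tuple Prod.fst 0
      (fun _ p => fun old => old + p.2) PySem.Dict.empty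
  have hkB := PySem.Dict.keys_foldl_modify_key tuple Prod.fst ([] : List Int)
      (fun _ p => fun vs => vs ++ [p.2]) PySem.Dict.empty
  have hndA := PySem.Dict.nodup_keys_foldl_modify_key tuple Prod.fst 0
      (fun _ p => fun old => old + p.2) PySem.Dict.empty (by simp)
  have hndB := PySem.Dict.nodup_keys_foldl_modify_key tuple Prod.fst ([] : List Int)
      (fun _ p => fun vs => vs ++ [p.2]) PySem.Dict.empty (by simp)
  rw [PySem.Dict.items_eq_map_keys _ hndA 0, PySem.Dict.items_eq_map_keys _ hndB [],
      List.map_map, hkA, hkB]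
  refine List.map_congr_left (fun k _ => ?_)
  have h1 := getD_foldA tuple PySem.Dict.empty k
  have h2 := PySem.Dict.getD_foldl_modify_append tuple
      (PySem.Dict.empty : PySem.Dict String (List Int)) k
  simp only [PySem.Dict.getD_empty, List.nil_append, zero_add] at h1 h2
  simp [Function.comp, h1, h2, reduceAdd_eq_sum]

-- ===== VERDICT (by name: the statement is the Claim_ definition above) =====
theorem convert_spec : Claim_equal_convert := fun tuple _ => convert_eq_alt tuple
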